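-- pv_equiv track=rewrite | github.com/Pillager225/DiscriminitiveAnalysis | DiscriminitiveAnalysis.py | discriminitiveAnalysis
-- ===== SOURCE A (Python) =====
-- def findMaxValueIndex(alist):
--     m = None
--     maxIndex = -1
--     for i, value in enumerate(alist):
--         if m is None or value > m:
--             maxIndex = i
--             m = value
--     return maxIndex
--
-- def discriminitiveAnalysis(cats, probCatGivenX):
--     DAinFavor = [0]*len(cats)
--     for i in range(len(cats)):
--         for j in range(i+1, len(cats)):
--             DA = probCatGivenX[i]-probCatGivenX[j]
--             if DA > 0:
--                 DAinFavor[i] += 1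
--             else:
--                 DAinFavor[j] += 1
--     # determine which category had the most DAs in its favor
--     return findMaxValueIndex(DAinFavor)
-- ===== SOURCE B (Python) =====
-- def discriminitiveAnalysis(cats, probCatGivenX):
--     # Single pass: the category winning all pairwise comparisons is the one
--     # with maximal probability, ties broken by the highest index.
--     best = -1
--     for i in range(len(cats)):
--         if best == -1 or probCatGivenX[i] >= probCatGivenX[best]:
--             best = i
--     return best
-- ===== Notes on version B (the rewrite author's own statement) =====
-- stated objective: faster
-- what changed: A tallies all n(n-1)/2 pairwise probability comparisons into an array and then scans it for the first maximum; B is a single left-to-right pass keeping the index of the running maximum probability, preferring the later index on ties (the pairwise-vote winner is exactly the last argmax).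
import Mathlib
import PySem

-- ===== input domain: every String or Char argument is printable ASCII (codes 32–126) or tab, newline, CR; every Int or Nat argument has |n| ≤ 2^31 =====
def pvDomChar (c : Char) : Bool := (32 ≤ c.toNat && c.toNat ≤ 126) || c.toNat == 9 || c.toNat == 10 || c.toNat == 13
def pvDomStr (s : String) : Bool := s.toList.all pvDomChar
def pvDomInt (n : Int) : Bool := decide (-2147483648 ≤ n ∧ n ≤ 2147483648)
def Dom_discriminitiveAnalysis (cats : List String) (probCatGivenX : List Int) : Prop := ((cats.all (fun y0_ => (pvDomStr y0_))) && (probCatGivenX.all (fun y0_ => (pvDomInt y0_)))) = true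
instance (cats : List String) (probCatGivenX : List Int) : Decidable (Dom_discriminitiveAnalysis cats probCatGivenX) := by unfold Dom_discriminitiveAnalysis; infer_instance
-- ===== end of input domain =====

-- B replaces A's quadratic pairwise-comparison tally by a single-pass argmax
-- (ties broken by the highest index); objective: faster.

-- ===== PORT A =====
def pvFindMaxValueIndex (alist : List Int) : Int :=
  let st := alist.foldl (fun (st : Option Int × Int × Int) value =>
      match st with
      | (m, maxIndex, i) =>
        if m.isNone || decide (value > m.getD 0) then (some value, i, i + 1)
        else (m, maxIndex, i + 1)) ((none : Option Int), (-1 : Int), (0 : Int))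
  st.2.1

def discriminitiveAnalysis (cats : List String) (probCatGivenX : List Int) : Int :=
  let n : Int := (cats.length : Int)
  let DAinFavor : List Int := List.replicate cats.length (0 : Int)
  let DAinFavor := (PySem.List.pyRange 0 n).foldl (fun da i =>
    (PySem.List.pyRange (i + 1) n).foldl (fun da j =>
      let DA := PySem.List.pyGetD probCatGivenX i 0 - PySem.List.pyGetD probCatGivenX j 0
      if DA > 0 then da.set i.toNat (PySem.List.pyGetD da i 0 + 1)
      else da.set j.toNat (PySem.List.pyGetD da j 0 + 1)) da) DAinFavor
  pvFindMaxValueIndex DAinFavor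

-- ===== PORT B =====
def discriminitiveAnalysis_alt (cats : List String) (probCatGivenX : List Int) : Int :=
  (PySem.List.pyRange 0 (cats.length : Int)).foldl (fun best i =>
    if best = -1 ∨ PySem.List.pyGetD probCatGivenX i 0 ≥ PySem.List.pyGetD probCatGivenX best 0
    then i else best) (-1)

-- ===== PRECONDITION & SPEC =====
-- Pre_ excludes exactly the inputs where Python A raises IndexError: at least two
-- categories with probCatGivenX shorter than cats (with ≤ 1 category no index is read).
def Pre_discriminitiveAnalysis (cats : List String) (probCatGivenX : List Int) : Prop :=
  cats.length ≤ 1 ∨ cats.length ≤ probCatGivenX.length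
instance (cats : List String) (probCatGivenX : List Int) : Decidable (Pre_discriminitiveAnalysis cats probCatGivenX) := by unfold Pre_discriminitiveAnalysis; infer_instance

def pvWitness_discriminitiveAnalysis : List String × List Int := (["a", "b"], [1, 2])

def Spec_discriminitiveAnalysis (cats : List String) (probCatGivenX : List Int) (out : Int) : Prop := out = discriminitiveAnalysis_alt cats probCatGivenX
instance (cats : List String) (probCatGivenX : List Int) (out : Int) : Decidable (Spec_discriminitiveAnalysis cats probCatGivenX out) := by unfold Spec_discriminitiveAnalysis; infer_instance

-- ===== CLAIM (what is proved, stated in full; the proofs are below) =====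
def Claim_equal_discriminitiveAnalysis : Prop := ∀ (cats : List String) (probCatGivenX : List Int), Dom_discriminitiveAnalysis cats probCatGivenX → Pre_discriminitiveAnalysis cats probCatGivenX → Spec_discriminitiveAnalysis cats probCatGivenX (discriminitiveAnalysis cats probCatGivenX)

-- ===== LEMMAS AND PROOFS =====

-- Abbreviation for the ports' element access (Python's xs[i] on in-range indices).
def pvP (p : List Int) (i : Int) : Int := PySem.List.pyGetD p i 0

-- Winner of the pair (i, j) in A's inner loop.
def pvW (p : List Int) (pr : Int × Int) : Int :=
  if pvP p pr.1 - pvP p pr.2 > 0 then pr.1 else pr.2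

-- One increment of A's tally array at the winner's index.
def pvStep (p : List Int) (da : List Int) (pr : Int × Int) : List Int :=
  da.set (pvW p pr).toNat (PySem.List.pyGetD da (pvW p pr) 0 + 1)

-- The list of index pairs (i, j), 0 ≤ i < j < n, in A's loop order.
def pvPairs (n : Int) : List (Int × Int) :=
  (PySem.List.pyRange 0 n).flatMap (fun i => (PySem.List.pyRange (i + 1) n).map (fun j => (i, j)))

-- B's loop body.
def pvBStep (p : List Int) (best i : Int) : Int :=
  if best = -1 ∨ pvP p i ≥ pvP p best then i else best

-- A's findMaxValueIndex loop body.
def pvFStep (st : Option Int × Int × Int) (value : Int) : Option Int × Int × Int :=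
  match st with
  | (m, maxIndex, i) =>
    if m.isNone || decide (value > m.getD 0) then (some value, i, i + 1)
    else (m, maxIndex, i + 1)

lemma pv_len_pyRange (a b : Int) : (PySem.List.pyRange a b).length = (b - a).toNat := by
  rw [PySem.List.pyRange_of_pos a b (by norm_num)]
  simp only [List.length_map, List.length_range]
  split_ifs with h
  · norm_num
  · omega

lemma pv_nodup_pyRange (a b : Int) : (PySem.List.pyRange a b).Nodup := by
  rw [PySem.List.pyRange_of_pos a b (by norm_num)]
  apply List.Nodup.map
  · intro x y hxy; simp at hxy; omega
  · exact List.nodup_range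

-- A 0/1-valued sum is a countP.
lemma pv_sum_ite (L : List Int) (c : Int → Bool) :
    (L.map (fun i => if c i then 1 else 0)).sum = L.countP c := by
  induction L with
  | nil => rfl
  | cons x t ih => simp [List.countP_cons, ih]; split_ifs <;> omega

-- A's inner-loop body is exactly one pvStep.
lemma pv_body_eq (p : List Int) (da : List Int) (i j : Int) :
    (if PySem.List.pyGetD p i 0 - PySem.List.pyGetD p j 0 > 0
     then da.set i.toNat (PySem.List.pyGetD da i 0 + 1)
     else da.set j.toNat (PySem.List.pyGetD da j 0 + 1)) = pvStep p da (i, j) := by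
  unfold pvStep pvW pvP
  split_ifs <;> rfl

-- Flattening A's nested loops into one fold over the pair list.
lemma pv_flatten (p : List Int) (n : Int) (l : List Int) (da : List Int) :
    l.foldl (fun da i => (PySem.List.pyRange (i + 1) n).foldl (fun da j =>
        if PySem.List.pyGetD p i 0 - PySem.List.pyGetD p j 0 > 0
        then da.set i.toNat (PySem.List.pyGetD da i 0 + 1)
        else da.set j.toNat (PySem.List.pyGetD da j 0 + 1)) da) da
    = (l.flatMap (fun i => (PySem.List.pyRange (i + 1) n).map (fun j => (i, j)))).foldl (pvStep p) da := by
  induction l generalizing da with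
  | nil => rfl
  | cons x t ih =>
    simp only [List.foldl_cons, List.flatMap_cons, List.foldl_append, List.foldl_map]
    rw [← ih]
    congr 1
    apply PySem.List.foldl_congr_mem
    intro acc a _
    exact pv_body_eq p acc x a

lemma pv_fold_length (p : List Int) (q : List (Int × Int)) (da : List Int) :
    (q.foldl (pvStep p) da).length = da.length := by
  induction q generalizing da with
  | nil => rfl
  | cons x t ih => simp [List.foldl_cons, ih, pvStep]

lemma pv_mem_pairs (n : Int) (pr : Int × Int) (h : pr ∈ pvPairs n) :
    0 ≤ pr.1 ∧ pr.1 < pr.2 ∧ pr.2 < n := by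
  unfold pvPairs at h
  simp only [List.mem_flatMap, List.mem_map] at h
  obtain ⟨i, hi, j, hj, rfl⟩ := h
  rw [PySem.List.mem_pyRange_one] at hi hj
  exact ⟨hi.1, by omega, hj.2⟩

-- The tally fold counts, at each index k, the pairs whose winner is k.
lemma pv_fold_getD (p : List Int) (q : List (Int × Int)) (da : List Int) (k : Nat)
    (hk : k < da.length)
    (hq : ∀ pr ∈ q, 0 ≤ pvW p pr ∧ (pvW p pr).toNat < da.length) :
    (q.foldl (pvStep p) da).getD k 0
      = da.getD k 0 + (q.countP (fun pr => pvW p pr == (k : Int)) : Int) := by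
  induction q generalizing da with
  | nil => simp
  | cons pr t ih =>
    obtain ⟨hw0, hwlt⟩ := hq pr (List.mem_cons_self ..)
    have hlen : (pvStep p da pr).length = da.length := by simp [pvStep]
    rw [List.foldl_cons, ih (pvStep p da pr) (by omega)
        (fun x hx => by rw [hlen]; exact hq x (List.mem_cons_of_mem _ hx))]
    have hset : (pvStep p da pr).getD k 0
        = da.getD k 0 + if pvW p pr == (k : Int) then 1 else 0 := by
      unfold pvStep
      rw [PySem.List.pyGetD_of_nonneg da 0 hw0]
      by_cases h : (pvW p pr).toNat = k
      · have heq : pvW p pr = (k : Int) := by omega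
        subst h
        rw [List.getD_eq_getElem _ _ (by simpa using hwlt),
            List.getElem_set_self (by simpa using hwlt)]
        rw [if_pos (by simpa using heq)]
      · have hne : ¬ (pvW p pr == (k : Int)) = true := by simp; omega
        rw [List.getD_eq_getElem?_getD, List.getElem?_set, if_neg h,
            ← List.getD_eq_getElem?_getD]
        simp [hne]
    rw [hset, List.countP_cons]
    split_ifs <;> push_cast <;> ring

-- Closed evaluation of the winner count at index k < n.
lemma pv_count_eval (p : List Int) (n k : Nat) (hk : k < n) :
    (pvPairs (n : Int)).countP (fun pr => pvW p pr == (k : Int))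
      = (PySem.List.pyRange ((k : Int) + 1) (n : Int)).countP (fun j => decide (pvP p k > pvP p j))
        + (PySem.List.pyRange 0 (k : Int)).countP (fun i => !decide (pvP p i > pvP p k)) := by
  unfold pvPairs
  rw [List.countP_flatMap]
  rw [PySem.List.pyRange_one_append 0 (k : Int) (n : Int) (by omega) (by omega)]
  rw [PySem.List.pyRange_one_cons (a := (k : Int)) (b := (n : Int)) (by omega)]
  rw [List.map_append, List.map_cons, List.sum_append, List.sum_cons]
  have h1 : (List.map (List.countP (fun pr => pvW p pr == (k : Int)) ∘
        fun i => (PySem.List.pyRange (i + 1) (n : Int)).map (fun j => (i, j)))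
        (PySem.List.pyRange 0 (k : Int))).sum
      = (PySem.List.pyRange 0 (k : Int)).countP (fun i => !decide (pvP p i > pvP p k)) := by
    rw [← pv_sum_ite]
    apply congrArg
    apply List.map_congr_left
    intro i hi
    rw [PySem.List.mem_pyRange_one] at hi
    simp only [Function.comp_apply, List.countP_map]
    have hcongr : (PySem.List.pyRange (i + 1) (n : Int)).countP
          ((fun pr => pvW p pr == (k : Int)) ∘ fun j => (i, j))
        = (PySem.List.pyRange (i + 1) (n : Int)).countP
          (fun j => j == (k : Int) && !decide (pvP p i - pvP p (k : Int) > 0)) := by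
      apply List.countP_congr
      intro j hj
      rw [PySem.List.mem_pyRange_one] at hj
      simp only [Function.comp_apply, pvW]
      by_cases hjk : j = (k : Int)
      · subst hjk
        split_ifs with hc <;> (simp; omega)
      · split_ifs with hc <;> (simp [hjk]; try omega)
    rw [hcongr]
    by_cases hb : pvP p i > pvP p (k : Int)
    · have : (!decide (pvP p i - pvP p (k : Int) > 0)) = false := by simp; omega
      simp [hb]
    · have hbt : (!decide (pvP p i - pvP p (k : Int) > 0)) = true := by simp; omega
      simp only [hbt, Bool.and_true, hb]
      have : (PySem.List.pyRange (i + 1) (n : Int)).countP (fun j => j == (k : Int))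
          = (PySem.List.pyRange (i + 1) (n : Int)).count (k : Int) := rfl
      rw [this, List.count_eq_one_of_mem (pv_nodup_pyRange _ _)
        (by rw [PySem.List.mem_pyRange_one]; omega)]
      simp
  have h2 : List.countP (fun pr => pvW p pr == (k : Int))
        ((PySem.List.pyRange ((k : Int) + 1) (n : Int)).map (fun j => ((k : Int), j)))
      = (PySem.List.pyRange ((k : Int) + 1) (n : Int)).countP (fun j => decide (pvP p k > pvP p j)) := by
    rw [List.countP_map]
    apply List.countP_congr
    intro j hj
    rw [PySem.List.mem_pyRange_one] at hj
    simp only [Function.comp_apply, pvW]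
    split_ifs with hc <;> simp <;> omega
  have h3 : (List.map (List.countP (fun pr => pvW p pr == (k : Int)) ∘
        fun i => (PySem.List.pyRange (i + 1) (n : Int)).map (fun j => (i, j)))
        (PySem.List.pyRange ((k : Int) + 1) (n : Int))).sum = 0 := by
    apply List.sum_eq_zero
    intro x hx
    rw [List.mem_map] at hx
    obtain ⟨i, hi, rfl⟩ := hx
    rw [PySem.List.mem_pyRange_one] at hi
    simp only [Function.comp_apply, List.countP_map]
    rw [List.countP_eq_zero]
    intro j hj
    rw [PySem.List.mem_pyRange_one] at hj
    simp only [Function.comp_apply, pvW]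
    split_ifs with hc <;> simp <;> omega
  rw [h1, h3]
  simp only [Function.comp_apply]
  rw [h2]
  omega

-- B's fold computes the last argmax of pvP over [0, n).
lemma pv_alt_inv (p : List Int) (n : Nat) (hn : 0 < n) :
    0 ≤ (PySem.List.pyRange 0 (n : Int)).foldl (pvBStep p) (-1)
    ∧ (PySem.List.pyRange 0 (n : Int)).foldl (pvBStep p) (-1) < (n : Int)
    ∧ (∀ j : Nat, j < n → pvP p j ≤ pvP p ((PySem.List.pyRange 0 (n : Int)).foldl (pvBStep p) (-1)))
    ∧ (∀ j : Nat, (PySem.List.pyRange 0 (n : Int)).foldl (pvBStep p) (-1) < (j : Int) → j < n →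
        pvP p j < pvP p ((PySem.List.pyRange 0 (n : Int)).foldl (pvBStep p) (-1))) := by
  induction n with
  | zero => omega
  | succ t ih =>
    have hsplit : PySem.List.pyRange 0 ((t + 1 : Nat) : Int)
        = PySem.List.pyRange 0 (t : Int) ++ [(t : Int)] := by
      push_cast
      exact PySem.List.pyRange_one_succ_right (by positivity)
    rw [hsplit, List.foldl_append, List.foldl_cons, List.foldl_nil]
    by_cases ht : t = 0
    · subst ht
      simp only [Nat.cast_zero]
      have : PySem.List.pyRange 0 (0 : Int) = [] := rfl
      rw [this, List.foldl_nil]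
      have hstep : pvBStep p (-1) 0 = 0 := by simp [pvBStep]
      rw [hstep]
      refine ⟨le_refl _, by norm_num, ?_, ?_⟩
      · intro j hj; interval_cases j; simp
      · intro j h0 hj; omega
    · obtain ⟨h0, hlt, hle, hstrict⟩ := ih (by omega)
      set m := (PySem.List.pyRange 0 (t : Int)).foldl (pvBStep p) (-1) with hm
      have hne : m ≠ -1 := by omega
      by_cases hge : pvP p t ≥ pvP p m
      · have hstep : pvBStep p m (t : Int) = (t : Int) := by simp [pvBStep, hge]
        rw [hstep]
        refine ⟨by positivity, by push_cast; omega, ?_, ?_⟩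
        · intro j hj
          rcases Nat.lt_or_ge j t with h | h
          · exact le_trans (hle j h) hge
          · have : j = t := by omega
            subst this; exact le_refl _
        · intro j hjt hj
          omega
      · have hstep : pvBStep p m (t : Int) = m := by simp [pvBStep, hne, hge]
        rw [hstep]
        push_cast
        refine ⟨h0, by omega, ?_, ?_⟩
        · intro j hj
          rcases Nat.lt_or_ge j t with h | h
          · exact hle j h
          · have : j = t := by omega
            subst this; omega
        · intro j hjm hj
          rcases Nat.lt_or_ge j t with h | h
          · exact hstrict j hjm h
          · have : j = t := by omega
            subst this; omega

lemma pv_fmvi_eq (alist : List Int) :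
    pvFindMaxValueIndex alist = (alist.foldl pvFStep (none, -1, 0)).2.1 := rfl

-- The counter of A's max-scan is the number of processed elements, and the
-- stored maximum (if any) is one of them.
lemma pv_fstep_counter (L : List Int) (m : Option Int) (mi i : Int) :
    (L.foldl pvFStep (m, mi, i)).2.2 = i + (L.length : Int)
    ∧ ((L.foldl pvFStep (m, mi, i)).1 = m ∨ ∃ v ∈ L, (L.foldl pvFStep (m, mi, i)).1 = some v) := by
  induction L generalizing m mi i with
  | nil => simp
  | cons x t ih =>
    rw [List.foldl_cons]
    simp only [pvFStep]
    split_ifs with h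
    · obtain ⟨h1, h2⟩ := ih (some x) i (i + 1)
      refine ⟨by rw [h1]; push_cast [List.length_cons]; ring, ?_⟩
      rcases h2 with h2 | ⟨v, hv, h2⟩
      · exact Or.inr ⟨x, List.mem_cons_self .., h2⟩
      · exact Or.inr ⟨v, List.mem_cons_of_mem _ hv, h2⟩
    · obtain ⟨h1, h2⟩ := ih m mi (i + 1)
      refine ⟨by rw [h1]; push_cast [List.length_cons]; ring, ?_⟩
      rcases h2 with h2 | ⟨v, hv, h2⟩
      · exact Or.inl h2
      · exact Or.inr ⟨v, List.mem_cons_of_mem _ hv, h2⟩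

-- Once the stored maximum dominates the rest of the list, the scan keeps it.
lemma pv_fstep_no_improve (L : List Int) (v : Int) (mi i : Int)
    (h : ∀ y ∈ L, y ≤ v) :
    L.foldl pvFStep (some v, mi, i) = (some v, mi, i + (L.length : Int)) := by
  induction L generalizing i with
  | nil => simp
  | cons x t ih =>
    rw [List.foldl_cons]
    have hx : x ≤ v := h x (List.mem_cons_self ..)
    have : pvFStep (some v, mi, i) x = (some v, mi, i + 1) := by
      simp only [pvFStep]; simp; omega
    rw [this, ih (i + 1) (fun y hy => h y (List.mem_cons_of_mem _ hy))]
    simp only [List.length_cons, Prod.mk.injEq]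
    refine ⟨trivial, trivial, by push_cast; ring⟩

-- findMaxValueIndex returns the position of a unique strict maximum.
lemma pv_fmvi_unique (da : List Int) (m : Nat) (hm : m < da.length)
    (hmax : ∀ k, k < da.length → k ≠ m → da.getD k 0 < da.getD m 0) :
    pvFindMaxValueIndex da = (m : Int) := by
  rw [pv_fmvi_eq]
  have hdecomp : da = da.take m ++ da[m] :: da.drop (m + 1) := by
    conv_lhs => rw [← List.take_append_drop m da]
    rw [List.drop_eq_getElem_cons hm]
  rw [hdecomp]
  rw [List.foldl_append, List.foldl_cons]
  obtain ⟨hc, hv⟩ := pv_fstep_counter (da.take m) none (-1) 0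
  have hlen : (da.take m).length = m := by simp; omega
  have htake_lt : ∀ y ∈ da.take m, y < da[m] := by
    intro y hy
    rw [List.mem_iff_getElem] at hy
    obtain ⟨t, ht, rfl⟩ := hy
    rw [List.getElem_take]
    have ht' : t < m := by omega
    have := hmax t (by omega) (by omega)
    rwa [List.getD_eq_getElem da 0 (by omega), List.getD_eq_getElem da 0 hm] at this
  set st1 := (da.take m).foldl pvFStep (none, -1, 0) with hst1
  have hst1e : pvFStep st1 da[m] = (some da[m], (m : Int), (m : Int) + 1) := by
    obtain ⟨m1, mi1, i1⟩ := st1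
    have hi1 : i1 = (m : Int) := by simpa [hlen] using hc
    rcases hv with h | ⟨v, hvm, h⟩ <;> simp only at h <;> subst h
    · simp only [pvFStep]; simp [hi1]
    · have : v < da[m] := htake_lt v hvm
      simp only [pvFStep]; simp [hi1]; omega
  rw [hst1e]
  have hdrop_le : ∀ y ∈ da.drop (m + 1), y ≤ da[m] := by
    intro y hy
    rw [List.mem_iff_getElem] at hy
    obtain ⟨t, ht, rfl⟩ := hy
    rw [List.getElem_drop]
    have := hmax (m + 1 + t) (by simp at ht; omega) (by omega)
    rw [List.getD_eq_getElem da 0 (by simp at ht; omega), List.getD_eq_getElem da 0 hm] at this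
    omega
  rw [pv_fstep_no_improve _ _ _ _ hdrop_le]

-- A's value equals findMaxValueIndex of the pair-fold tally.
lemma pv_A_eq (cats : List String) (p : List Int) :
    discriminitiveAnalysis cats p
      = pvFindMaxValueIndex ((pvPairs (cats.length : Int)).foldl (pvStep p)
          (List.replicate cats.length (0 : Int))) := by
  unfold discriminitiveAnalysis pvPairs
  exact congrArg pvFindMaxValueIndex
    (pv_flatten p (cats.length : Int) (PySem.List.pyRange 0 (cats.length : Int))
      (List.replicate cats.length (0 : Int)))

lemma pv_B_eq (cats : List String) (p : List Int) :
    discriminitiveAnalysis_alt cats p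
      = (PySem.List.pyRange 0 (cats.length : Int)).foldl (pvBStep p) (-1) := rfl

-- ===== VERDICT (by name: the statement is the Claim_ definition above) =====
theorem discriminitiveAnalysis_spec : Claim_equal_discriminitiveAnalysis := by
  intro cats p _ _
  unfold Spec_discriminitiveAnalysis
  rw [pv_A_eq, pv_B_eq]
  rcases Nat.eq_zero_or_pos cats.length with hn | hn
  · rw [hn]
    rfl
  · obtain ⟨h0, hlt, hle, hstrict⟩ := pv_alt_inv p cats.length hn
    set n := cats.length with hnn
    set m := (PySem.List.pyRange 0 (n : Int)).foldl (pvBStep p) (-1) with hm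
    set mN := m.toNat with hmN
    have hmc : (mN : Int) = m := by omega
    set da0 : List Int := List.replicate n (0 : Int) with hda0
    have hq : ∀ pr ∈ pvPairs (n : Int), 0 ≤ pvW p pr ∧ (pvW p pr).toNat < da0.length := by
      intro pr hpr
      obtain ⟨ha, hb, hc⟩ := pv_mem_pairs _ _ hpr
      have : pvW p pr = pr.1 ∨ pvW p pr = pr.2 := by
        unfold pvW; split_ifs <;> simp
      simp only [hda0, List.length_replicate]
      omega
    have hgetD : ∀ k : Nat, k < n →
        ((pvPairs (n : Int)).foldl (pvStep p) da0).getD k 0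
          = (((pvPairs (n : Int)).countP (fun pr => pvW p pr == (k : Int)) : Nat) : Int) := by
      intro k hk
      rw [pv_fold_getD p _ da0 k (by simp [hda0]; omega) hq,
          List.getD_replicate _ (by omega)]
      ring
    have hlenX : ∀ k : Nat, k < n →
        (PySem.List.pyRange ((k : Int) + 1) (n : Int)).length = n - k - 1 := by
      intro k hk; rw [pv_len_pyRange]; omega
    have hlenY : ∀ k : Nat, (PySem.List.pyRange 0 (k : Int)).length = k := by
      intro k; rw [pv_len_pyRange]; omega
    -- the winner count at the last argmax is n - 1
    have hcm : (pvPairs (n : Int)).countP (fun pr => pvW p pr == (mN : Int)) = n - 1 := by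
      rw [pv_count_eval p n mN (by omega)]
      have hX : (PySem.List.pyRange ((mN : Int) + 1) (n : Int)).countP
            (fun j => decide (pvP p mN > pvP p j))
          = n - mN - 1 := by
        conv_rhs => rw [← hlenX mN (by omega)]
        rw [List.countP_eq_length]
        intro j hj
        rw [PySem.List.mem_pyRange_one] at hj
        have hj0 : (j.toNat : Int) = j := by omega
        have := hstrict j.toNat (by omega) (by omega)
        rw [hj0] at this
        simp only [hmc, decide_eq_true_eq]
        omega
      have hY : (PySem.List.pyRange 0 (mN : Int)).countP
            (fun i => !decide (pvP p i > pvP p mN)) = mN := by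
        conv_rhs => rw [← hlenY mN]
        rw [List.countP_eq_length]
        intro i hi
        rw [PySem.List.mem_pyRange_one] at hi
        have hi0 : (i.toNat : Int) = i := by omega
        have := hle i.toNat (by omega)
        rw [hi0] at this
        simp only [hmc, Bool.not_eq_true', decide_eq_false_iff_not]
        omega
      rw [hX, hY]; omega
    -- every other index wins strictly fewer comparisons
    have hck : ∀ k : Nat, k < n → k ≠ mN →
        (pvPairs (n : Int)).countP (fun pr => pvW p pr == (k : Int)) < n - 1 := by
      intro k hk hkm
      rw [pv_count_eval p n k hk]
      have hXle : (PySem.List.pyRange ((k : Int) + 1) (n : Int)).countP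
            (fun j => decide (pvP p k > pvP p j)) ≤ n - k - 1 := by
        have h := List.countP_le_length (p := fun j => decide (pvP p (k : Int) > pvP p j))
          (l := PySem.List.pyRange ((k : Int) + 1) (n : Int))
        rwa [hlenX k hk] at h
      have hYle : (PySem.List.pyRange 0 (k : Int)).countP
            (fun i => !decide (pvP p i > pvP p k)) ≤ k := by
        have h := List.countP_le_length (p := fun i => !decide (pvP p i > pvP p (k : Int)))
          (l := PySem.List.pyRange 0 (k : Int))
        rwa [hlenY k] at h
      rcases Nat.lt_or_ge k mN with hlt' | hge'
      · -- k < mN : index m witnesses a failed comparison in the X part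
        have hXne : (PySem.List.pyRange ((k : Int) + 1) (n : Int)).countP
              (fun j => decide (pvP p k > pvP p j))
            ≠ (PySem.List.pyRange ((k : Int) + 1) (n : Int)).length := by
          rw [Ne, List.countP_eq_length]
          intro hall
          have hmem : m ∈ PySem.List.pyRange ((k : Int) + 1) (n : Int) := by
            rw [PySem.List.mem_pyRange_one]; omega
          have := hall m hmem
          have hle' := hle k (by omega)
          simp only [decide_eq_true_eq] at this
          omega
        rw [hlenX k hk] at hXne
        omega
      · -- mN < k : index m witnesses a failed comparison in the Y part
        have hYne : (PySem.List.pyRange 0 (k : Int)).countP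
              (fun i => !decide (pvP p i > pvP p k))
            ≠ (PySem.List.pyRange 0 (k : Int)).length := by
          rw [Ne, List.countP_eq_length]
          intro hall
          have hmem : m ∈ PySem.List.pyRange 0 (k : Int) := by
            rw [PySem.List.mem_pyRange_one]; omega
          have := hall m hmem
          have hstr := hstrict k (by omega) hk
          simp only [Bool.not_eq_true', decide_eq_false_iff_not] at this
          omega
        rw [hlenY k] at hYne
        omega
    have hdalen : ((pvPairs (n : Int)).foldl (pvStep p) da0).length = n := by
      rw [pv_fold_length]; simp [hda0]
    rw [pv_fmvi_unique _ mN (by omega) ?_, hmc]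
    intro k hk hkm
    rw [hdalen] at hk
    rw [hgetD k hk, hgetD mN (by omega), hcm]
    have := hck k hk hkm
    exact_mod_cast this
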